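-- pv_equiv track=rewrite | github.com/GeoBobCa/BridgeMaster_v3 | src/app.py | get_auction_tree
-- ===== SOURCE A (Python) =====
-- def get_auction_tree(rules):
--     """Builds a hierarchy of the bidding system."""
--     tree = {}
--     sorted_rules = sorted(rules, key=lambda x: len(x.get('auction', [])))
--     for rule in sorted_rules:
--         auction_path = tuple(rule.get('auction', []))
--         if auction_path not in tree: tree[auction_path] = []
--         tree[auction_path].append(rule)
--     return tree
-- ===== SOURCE B (Python) =====
-- def get_auction_tree(rules):
--     """Builds a hierarchy of the bidding system."""
--     keys = []
--     for rule in rules: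
--         k = tuple(rule.get('auction', []))
--         if k not in keys:
--             keys.append(k)
--     keys.sort(key=len)
--     return {k: [r for r in rules if tuple(r.get('auction', [])) == k] for k in keys}
-- ===== Notes on version B (the rewrite author's own statement) =====
-- stated objective: alternative
-- what changed: A sorts all rules by auction length and groups them into a dict in one fold; B never builds a dict while scanning: it collects the distinct auction paths in first-encounter order, stably sorts just those keys by length, and builds each group as a filter over the original rules, relying on sort stability for the identical key and per-group order.
import Mathlib
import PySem

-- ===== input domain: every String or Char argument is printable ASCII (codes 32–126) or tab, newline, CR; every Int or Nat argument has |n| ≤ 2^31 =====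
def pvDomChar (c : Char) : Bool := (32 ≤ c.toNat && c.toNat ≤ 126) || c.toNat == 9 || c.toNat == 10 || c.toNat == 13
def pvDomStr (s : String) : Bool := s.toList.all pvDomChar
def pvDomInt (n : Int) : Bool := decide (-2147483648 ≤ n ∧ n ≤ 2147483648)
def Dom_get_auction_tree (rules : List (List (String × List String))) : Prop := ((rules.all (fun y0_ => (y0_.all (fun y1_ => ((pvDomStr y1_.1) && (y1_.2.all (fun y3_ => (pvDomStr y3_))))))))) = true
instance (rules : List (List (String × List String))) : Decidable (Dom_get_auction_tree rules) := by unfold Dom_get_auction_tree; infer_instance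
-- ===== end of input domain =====

-- B builds no dict while scanning: it collects the distinct auction paths in first-encounter
-- order, stably sorts only those keys by length, and forms each group by filtering the
-- original rules; equal to A's sort-then-group by sort stability.

-- rule.get('auction', []) — first-match dict lookup, shared helper of both ports
def pvAuction (rule : List (String × List String)) : List String :=
  (PySem.Dict.mk rule).getD "auction" []

-- ===== PORT A =====
def get_auction_tree (rules : List (List (String × List String))) : List (List String × List (List (String × List String))) :=
  let sorted_rules := PySem.List.sorted rules (fun x => (pvAuction x).length) false
  (sorted_rules.foldl
    (fun (tree : PySem.Dict (List String) (List (List (String × List String)))) rule =>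
      let auction_path := pvAuction rule
      let tree1 := if tree.contains auction_path then tree else tree.insert auction_path []
      tree1.modify auction_path [] (fun v => v ++ [rule]))
    PySem.Dict.empty).items

-- ===== PORT B =====
def get_auction_tree_alt (rules : List (List (String × List String))) : List (List String × List (List (String × List String))) :=
  -- keys = []; for rule in rules: if k not in keys: keys.append(k)
  let keys := rules.foldl
    (fun (ks : List (List String)) rule =>
      let k := pvAuction rule
      if ks.contains k then ks else ks ++ [k]) []
  -- keys.sort(key=len)  (stable)
  let skeys := PySem.List.sorted keys List.length false
  -- {k: [r for r in rules if tuple(r.get('auction', [])) == k] for k in keys}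
  skeys.map (fun k => (k, rules.filter (fun r => pvAuction r == k)))

-- ===== PRECONDITION & SPEC =====
def Spec_get_auction_tree (rules : List (List (String × List String))) (out : List (List String × List (List (String × List String)))) : Prop := out = get_auction_tree_alt rules
instance (rules : List (List (String × List String))) (out : List (List String × List (List (String × List String)))) : Decidable (Spec_get_auction_tree rules out) := by unfold Spec_get_auction_tree; infer_instance

-- ===== CLAIM (what is proved, stated in full; the proofs are below) =====
def Claim_equal_get_auction_tree : Prop := ∀ (rules : List (List (String × List String))), Dom_get_auction_tree rules → Spec_get_auction_tree rules (get_auction_tree rules)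

-- ===== LEMMAS AND PROOFS =====

-- A's 'if path not in tree: tree[path] = []' guard followed by the append is one Dict.modify
theorem pvGuardStep (tree : PySem.Dict (List String) (List (List (String × List String)))) (rule : List (String × List String)) :
    (if tree.contains (pvAuction rule) then tree else tree.insert (pvAuction rule) []).modify
      (pvAuction rule) [] (fun v => v ++ [rule])
    = tree.modify (pvAuction rule) [] (fun v => v ++ [rule]) := by
  by_cases hc : tree.contains (pvAuction rule) = true
  · simp [hc]
  · simp only [Bool.not_eq_true] at hc
    simp only [hc, Bool.false_eq_true, if_false]
    have hno : ∀ q ∈ tree.items, (q.1 == pvAuction rule) = false := by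
      intro q hq
      by_contra hb
      simp only [Bool.not_eq_false] at hb
      have hgood : tree.contains (pvAuction rule) = true := by
        simp only [PySem.Dict.contains, List.any_eq_true]
        exact ⟨q, hq, hb⟩
      rw [hgood] at hc; simp at hc
    have hget : tree.get? (pvAuction rule) = none := by
      simp only [PySem.Dict.get?, Option.map_eq_none_iff]
      rw [List.find?_eq_none]
      intro q hq; simp [hno q hq]
    have hgetIns : (tree.insert (pvAuction rule) []).get? (pvAuction rule)
        = some [] := by
      simp only [PySem.Dict.insert, hc, Bool.false_eq_true, if_false, PySem.Dict.get?]
      rw [List.find?_append]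
      rw [List.find?_eq_none.mpr (by intro q hq; simp [hno q hq])]
      simp
    simp only [PySem.Dict.modify, PySem.Dict.getD, hget, hgetIns, Option.getD_some, Option.getD_none]
    have hany : (tree.items.any fun q => q.1 == pvAuction rule) = false := by
      simpa [PySem.Dict.contains] using hc
    have hcIns : (tree.insert (pvAuction rule) []).contains (pvAuction rule) = true := by
      simp only [PySem.Dict.insert, PySem.Dict.contains, hany, Bool.false_eq_true, if_false]
      simp
    simp only [PySem.Dict.insert, hcIns, if_true, hc, Bool.false_eq_true, if_false]
    congr 1
    simp only [List.map_append]
    rw [List.map_congr_left (fun q hq => by simp [hno q hq] : ∀ q ∈ tree.items, (if (q.1 == pvAuction rule) = true then (pvAuction rule, [] ++ [rule]) else q) = q)]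
    simp

-- value of A's grouping fold at key c
theorem pvFoldGetD (l : List (List (String × List String))) (c : List String) :
    (l.foldl (fun (tree : PySem.Dict (List String) (List (List (String × List String)))) rule =>
        tree.modify (pvAuction rule) [] (fun v => v ++ [rule])) PySem.Dict.empty).getD c []
    = l.filter (fun r => pvAuction r == c) := by
  have h := PySem.Dict.getD_foldl_modify_append
      (l.map (fun r => (pvAuction r, r))) (PySem.Dict.empty (κ := List String)) c
  rw [List.foldl_map] at h
  simp only at h
  rw [h]
  simp [PySem.Dict.getD, PySem.Dict.get?, PySem.Dict.empty, List.filter_map, Function.comp_def]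

-- ordered-dedup step
theorem pvOfListAppend {α : Type} [BEq α] [LawfulBEq α] (l : List α) (x : α) :
    PySem.Set.ofList (l ++ [x]) = if x ∈ l then PySem.Set.ofList l else PySem.Set.ofList l ++ [x] := by
  have h : PySem.Set.ofList (l ++ [x]) = PySem.Set.add (PySem.Set.ofList l) x := by
    simp [PySem.Set.ofList, List.foldl_append]
  rw [h]
  have hc : (PySem.Set.ofList l).contains x = decide (x ∈ l) := by
    simp [PySem.Set.contains, PySem.Set.mem_ofList]
  by_cases hm : x ∈ l
  · simp [PySem.Set.add, hc, hm]
  · simp [PySem.Set.add, hc, hm]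

-- A's grouping fold: keys in first-encounter order, value at a key = filter
theorem pvFoldItems (l : List (List (String × List String))) :
    (l.foldl (fun (tree : PySem.Dict (List String) (List (List (String × List String)))) rule =>
        tree.modify (pvAuction rule) [] (fun v => v ++ [rule])) PySem.Dict.empty).items
    = (PySem.Set.ofList (l.map pvAuction)).map (fun c => (c, l.filter (fun r => pvAuction r == c))) := by
  induction l using List.reverseRecOn with
  | nil => simp [PySem.Dict.empty, PySem.Set.ofList]
  | append_singleton l r ih =>
    rw [List.foldl_append, List.foldl_cons, List.foldl_nil]
    rw [show ∀ (d : PySem.Dict (List String) (List (List (String × List String)))),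
        d.modify (pvAuction r) [] (fun v => v ++ [r])
          = d.insert (pvAuction r) (d.getD (pvAuction r) [] ++ [r]) from fun d => rfl]
    rw [pvFoldGetD]
    simp only [List.map_append, List.map_cons, List.map_nil]
    rw [pvOfListAppend]
    by_cases hm : pvAuction r ∈ l.map pvAuction
    · have hmks : pvAuction r ∈ PySem.Set.ofList (l.map pvAuction) :=
        (PySem.Set.mem_ofList _ _).mpr hm
      have hcont : (l.foldl (fun (tree : PySem.Dict (List String) (List (List (String × List String)))) rule =>
          tree.modify (pvAuction rule) [] (fun v => v ++ [rule])) PySem.Dict.empty).contains (pvAuction r) = true := by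
        simp only [PySem.Dict.contains, List.any_eq_true, ih]
        exact ⟨(pvAuction r, l.filter (fun r' => pvAuction r' == pvAuction r)),
          List.mem_map_of_mem hmks, by simp⟩
      simp only [PySem.Dict.insert, hcont, if_true, hm, if_pos, ih, List.map_map]
      apply List.map_congr_left
      intro c' hc'
      by_cases hceq : c' = pvAuction r
      · subst hceq
        simp [List.filter_append]
      · have hbeq : (c' == pvAuction r) = false := by simpa using hceq
        have hbeq2 : (pvAuction r == c') = false := by simpa using (Ne.symm hceq)
        simp [Function.comp_def, hbeq, List.filter_append, hbeq2]
        exact fun h => absurd h hceq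
    · have hnotks : pvAuction r ∉ PySem.Set.ofList (l.map pvAuction) := by
        simpa [PySem.Set.mem_ofList] using hm
      have hfilnil : l.filter (fun r' => pvAuction r' == pvAuction r) = [] := by
        rw [List.filter_eq_nil_iff]
        intro r' hr' hb
        exact hm (by
          have hbb : pvAuction r' = pvAuction r := by simpa using hb
          exact hbb ▸ List.mem_map_of_mem hr')
      have hcont : (l.foldl (fun (tree : PySem.Dict (List String) (List (List (String × List String)))) rule =>
          tree.modify (pvAuction rule) [] (fun v => v ++ [rule])) PySem.Dict.empty).contains (pvAuction r) = false := by
        simp only [PySem.Dict.contains, ih, List.any_eq_false]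
        rintro ⟨c', v⟩ hq
        rcases List.mem_map.mp hq with ⟨c'', hc'', heq⟩
        have hfst : c'' = c' := congrArg Prod.fst heq
        subst hfst
        simp only [beq_eq_false_iff_ne, ne_eq]
        intro hcc
        have hcc' : c'' = pvAuction r := by simpa using hcc
        exact hnotks (hcc' ▸ hc'')
      simp only [PySem.Dict.insert, hcont, Bool.false_eq_true, if_false, hm, if_neg, ih,
        List.map_append, List.map_cons, List.map_nil, hfilnil, List.nil_append]
      congr 1
      · apply List.map_congr_left
        intro c' hc'
        have hne : pvAuction r ≠ c' := fun h => hnotks (h ▸ hc')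
        have hbeq2 : (pvAuction r == c') = false := by simpa using hne
        simp [List.filter_append, hbeq2]
      · simp only [List.filter_append, List.filter_cons, List.filter_nil]
        simp only [beq_self_eq_true, if_true, hfilnil, List.nil_append]

theorem pvInsertByMap {α β : Type} (f : α → β) (bef : α → α → Bool) (bef' : β → β → Bool)
    (h : ∀ a b, bef' (f a) (f b) = bef a b) (x : α) (l : List α) :
    PySem.List.insertBy bef' (f x) (l.map f) = (PySem.List.insertBy bef x l).map f := by
  induction l with
  | nil => simp [PySem.List.insertBy]
  | cons y ys ih =>
    simp only [List.map_cons, PySem.List.insertBy, h]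
    by_cases hb : bef x y = true
    · simp [hb]
    · simp only [Bool.not_eq_true] at hb
      simp [hb, ih]

theorem pvSortedMapAux {α β κ : Type} [LinearOrder κ] (f : α → β) (key : β → κ) :
    ∀ (l : List α) (acc : List α),
      (l.map f).foldl (fun a x => PySem.List.insertBy (fun a b => decide (key a < key b)) x a) (acc.map f)
      = (l.foldl (fun a x => PySem.List.insertBy (fun a b => decide (key (f a) < key (f b))) x a) acc).map f := by
  intro l
  induction l with
  | nil => intro acc; simp
  | cons x xs ih =>
    intro acc
    simp only [List.map_cons, List.foldl_cons]
    rw [pvInsertByMap f (fun a b => decide (key (f a) < key (f b))) (fun a b => decide (key a < key b)) (fun a b => rfl) x acc]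
    exact ih _

theorem pvSortedMap {α β κ : Type} [LinearOrder κ] (f : α → β) (key : β → κ) (l : List α) :
    PySem.List.sorted (l.map f) key false = (PySem.List.sorted l (fun x => key (f x)) false).map f := by
  rw [PySem.List.sorted_eq_foldl_insertBy, PySem.List.sorted_eq_foldl_insertBy]
  simpa using pvSortedMapAux f key l []

-- stability of the sort: filters over one key class are unchanged
theorem pvFilterInsertBy_neg {α : Type} (bef : α → α → Bool) (p : α → Bool) (x : α)
    (hx : p x = false) (l : List α) :
    (PySem.List.insertBy bef x l).filter p = l.filter p := by
  induction l with
  | nil => simp [PySem.List.insertBy, hx]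
  | cons y ys ih =>
    simp only [PySem.List.insertBy]
    by_cases hb : bef x y = true
    · simp [hb, List.filter_cons, hx]
    · simp only [Bool.not_eq_true] at hb
      simp [hb, List.filter_cons, ih]

theorem pvFilterInsertBy_pos {α κ : Type} [LinearOrder κ] (k : α → κ) (p : α → Bool) (x : α)
    (hx : p x = true) (hkey : ∀ y, p y = true → k y = k x) (l : List α)
    (hs : l.Pairwise (fun a b => k a ≤ k b)) :
    (PySem.List.insertBy (fun a b => decide (k a < k b)) x l).filter p = l.filter p ++ [x] := by
  induction l with
  | nil => simp [PySem.List.insertBy, hx]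
  | cons y ys ih =>
    rcases List.pairwise_cons.mp hs with ⟨hy, hys⟩
    simp only [PySem.List.insertBy]
    by_cases hb : k x < k y
    · simp only [decide_eq_true_eq, hb, if_pos]
      have hnil : (y :: ys).filter p = [] := by
        rw [List.filter_eq_nil_iff]
        intro z hz hpz
        have hz' := hkey z hpz
        rcases List.mem_cons.mp hz with rfl | hzys
        · exact absurd hz' (ne_of_gt hb)
        · exact absurd hz' (ne_of_gt (lt_of_lt_of_le hb (hy z hzys)))
      rw [List.filter_cons_of_pos hx, hnil]
      simp
    · simp only [decide_eq_true_eq, hb, if_neg, if_false]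
      rw [List.filter_cons, List.filter_cons, ih hys]
      by_cases hpy : p y = true <;> simp [hpy]

theorem pvFilterSorted {α κ : Type} [LinearOrder κ] (k : α → κ) (p : α → Bool) (c : κ)
    (hkey : ∀ y, p y = true → k y = c) (l : List α) :
    (PySem.List.sorted l k false).filter p = l.filter p := by
  induction l using List.reverseRecOn with
  | nil => simp [PySem.List.sorted]
  | append_singleton l x ih =>
    have hsort : PySem.List.sorted (l ++ [x]) k false
        = PySem.List.insertBy (fun a b => decide (k a < k b)) x (PySem.List.sorted l k false) := by
      rw [PySem.List.sorted_eq_foldl_insertBy, PySem.List.sorted_eq_foldl_insertBy, List.foldl_append]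
      simp
    rw [hsort, List.filter_append]
    by_cases hx : p x = true
    · rw [pvFilterInsertBy_pos k p x hx
        (fun y hy => (hkey y hy).trans (hkey x hx).symm) _ (PySem.List.sorted_pairwise l k), ih]
      simp [List.filter_cons, hx]
    · simp only [Bool.not_eq_true] at hx
      rw [pvFilterInsertBy_neg _ p x hx, ih]
      simp [List.filter_cons, hx]

theorem pvOfListSublist {α : Type} [BEq α] [LawfulBEq α] (l : List α) :
    List.Sublist (PySem.Set.ofList l) l := by
  induction l using List.reverseRecOn with
  | nil => simp [PySem.Set.ofList]
  | append_singleton l x ih =>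
    rw [pvOfListAppend]
    by_cases hm : x ∈ l
    · simpa [hm] using ih.trans (List.sublist_append_left l [x])
    · simpa [hm] using List.Sublist.append ih (List.Sublist.refl [x])

theorem pvFilterOfList {α : Type} [BEq α] [LawfulBEq α] (p : α → Bool) (l : List α) :
    (PySem.Set.ofList l).filter p = PySem.Set.ofList (l.filter p) := by
  induction l using List.reverseRecOn with
  | nil => simp [PySem.Set.ofList]
  | append_singleton l x ih =>
    rw [pvOfListAppend, List.filter_append]
    by_cases hp : p x = true
    · have hfx : List.filter p [x] = [x] := by simp [hp]
      rw [hfx, pvOfListAppend]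
      have hmem : x ∈ l.filter p ↔ x ∈ l := by simp [List.mem_filter, hp]
      by_cases hm : x ∈ l
      · simp [hm, hmem.mpr hm, ih]
      · simp [hm, hmem, ih, List.filter_append, hp]
    · simp only [Bool.not_eq_true] at hp
      have hfx : List.filter p [x] = [] := by simp [hp]
      rw [hfx, List.append_nil]
      by_cases hm : x ∈ l
      · simp [hm, ih]
      · simp [hm, List.filter_append, hfx, ih, hp]

-- two key-sorted lists with identical key-class filters are equal
theorem pvUniq {α κ : Type} [LinearOrder κ] (k : α → κ) :
    ∀ (l₁ l₂ : List α), l₁.Pairwise (fun a b => k a ≤ k b) → l₂.Pairwise (fun a b => k a ≤ k b) →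
      (∀ c, l₁.filter (fun x => decide (k x = c)) = l₂.filter (fun x => decide (k x = c))) → l₁ = l₂ := by
  intro l₁
  induction l₁ with
  | nil =>
    intro l₂ _ _ h
    cases l₂ with
    | nil => rfl
    | cons y t₂ =>
      have := h (k y)
      simp [List.filter_cons] at this
  | cons x t₁ ih =>
    intro l₂ h₁ h₂ h
    rcases List.pairwise_cons.mp h₁ with ⟨hx1, ht₁⟩
    cases l₂ with
    | nil =>
      have := h (k x)
      simp [List.filter_cons] at this
    | cons y t₂ =>
      rcases List.pairwise_cons.mp h₂ with ⟨hy2, ht₂⟩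
      have hxy : k x = k y := by
        by_contra hne
        have h1 := h (k x)
        rw [List.filter_cons_of_pos (by simp), List.filter_cons_of_neg (by simpa using fun hh => hne hh.symm)] at h1
        have hxmem : x ∈ t₂ := by
          have : x ∈ List.filter (fun z => decide (k z = k x)) t₂ := by rw [← h1]; simp
          exact (List.mem_filter.mp this).1
        have hyx : k y ≤ k x := hy2 x hxmem
        have h2 := h (k y)
        rw [List.filter_cons_of_neg (by simpa using hne), List.filter_cons_of_pos (by simp)] at h2
        have hymem : y ∈ t₁ := by
          have : y ∈ List.filter (fun z => decide (k z = k y)) t₁ := by rw [h2]; simp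
          exact (List.mem_filter.mp this).1
        have hxy' : k x ≤ k y := hx1 y hymem
        exact hne (le_antisymm hxy' hyx)
      have h1 := h (k x)
      rw [List.filter_cons_of_pos (by simp), List.filter_cons_of_pos (by simp [hxy])] at h1
      have hxeqy : x = y := (List.cons.injEq _ _ _ _ ▸ h1).1
      subst hxeqy
      have htails : ∀ c, t₁.filter (fun z => decide (k z = c)) = t₂.filter (fun z => decide (k z = c)) := by
        intro c
        by_cases hc : k x = c
        · have := h c
          rw [List.filter_cons_of_pos (by simp [hc]), List.filter_cons_of_pos (by simp [hxy ▸ hc])] at this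
          exact (List.cons.injEq _ _ _ _ ▸ this).2
        · have := h c
          rw [List.filter_cons_of_neg (by simpa using hc), List.filter_cons_of_neg (by simpa using (hxy ▸ hc : ¬ k x = c))] at this
          exact this
      exact congrArg (x :: ·) (ih t₂ ht₁ ht₂ htails)

-- ordered dedup commutes with the stable sort
theorem pvDedupSorted (xs : List (List String)) :
    PySem.Set.ofList (PySem.List.sorted xs List.length false)
    = PySem.List.sorted (PySem.Set.ofList xs) List.length false := by
  apply pvUniq List.length
  · exact (PySem.List.sorted_pairwise xs List.length).sublist (pvOfListSublist _)
  · exact PySem.List.sorted_pairwise _ _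
  · intro c
    rw [pvFilterOfList, pvFilterSorted List.length _ c (fun y hy => by simpa using hy),
        pvFilterSorted List.length _ c (fun y hy => by simpa using hy), pvFilterOfList]

-- B's key-collecting loop is exactly the ordered dedup of the auction paths
theorem pvKeysFold (rules : List (List (String × List String))) :
    rules.foldl (fun (ks : List (List String)) rule =>
      if ks.contains (pvAuction rule) then ks else ks ++ [pvAuction rule]) []
    = PySem.Set.ofList (rules.map pvAuction) := by
  rw [show PySem.Set.ofList (rules.map pvAuction)
      = (rules.map pvAuction).foldl PySem.Set.add [] from rfl]
  rw [List.foldl_map]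
  rfl

theorem main_eq (rules : List (List (String × List String))) :
    get_auction_tree rules = get_auction_tree_alt rules := by
  show ((PySem.List.sorted rules (fun x => (pvAuction x).length) false).foldl
      (fun (tree : PySem.Dict (List String) (List (List (String × List String)))) rule =>
        (if tree.contains (pvAuction rule) then tree else tree.insert (pvAuction rule) []).modify
          (pvAuction rule) [] (fun v => v ++ [rule]))
      PySem.Dict.empty).items
    = (PySem.List.sorted
        (rules.foldl (fun (ks : List (List String)) rule =>
          if ks.contains (pvAuction rule) then ks else ks ++ [pvAuction rule]) [])
        List.length false).map (fun k => (k, rules.filter (fun r => pvAuction r == k)))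
  rw [show (fun (tree : PySem.Dict (List String) (List (List (String × List String)))) rule =>
        (if tree.contains (pvAuction rule) then tree else tree.insert (pvAuction rule) []).modify
          (pvAuction rule) [] (fun v => v ++ [rule]))
      = (fun (tree : PySem.Dict (List String) (List (List (String × List String)))) rule =>
          tree.modify (pvAuction rule) [] (fun v => v ++ [rule]))
    from funext fun tree => funext fun rule => pvGuardStep tree rule]
  rw [pvFoldItems, pvKeysFold]
  have hA : (PySem.List.sorted rules (fun x => (pvAuction x).length) false).map pvAuction
      = PySem.List.sorted (rules.map pvAuction) List.length false :=
    (pvSortedMap pvAuction List.length rules).symm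
  rw [hA, pvDedupSorted]
  apply List.map_congr_left
  intro c hc
  have hfil : (PySem.List.sorted rules (fun x => (pvAuction x).length) false).filter
      (fun r => pvAuction r == c) = rules.filter (fun r => pvAuction r == c) :=
    pvFilterSorted (fun x => (pvAuction x).length) _ c.length
      (fun y hy => by have h : pvAuction y = c := by simpa using hy
                      simp [h]) rules
  rw [hfil]

-- ===== VERDICT (by name: the statement is the Claim_ definition above) =====
theorem get_auction_tree_spec : Claim_equal_get_auction_tree := by
  intro rules _
  unfold Spec_get_auction_tree
  exact main_eq rules
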